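-- pv_equiv track=rewrite | github.com/EliBildman/UMA | 230/Challenges/Lec05_student/fuckthis.py | cond
-- ===== SOURCE A (Python) =====
-- def cond(str):
--     bs = 0
--     for i in range(len(str)):
--         if str[i] == 'B':
--             bs += 1
--         if str[i] == 'C' and i > 0 and str[i - 1] == 'C':
--             return False
--     return bs >= 2
-- ===== SOURCE B (Python) =====
-- def cond(str):
--     return str.count('B') >= 2 and 'CC' not in str
-- ===== Notes on version B (the rewrite author's own statement) =====
-- stated objective: idiomatic
-- what changed: Replaces the fused index loop with per-character branches and early return by two independent whole-string library scans: a count of B characters compared with 2, and a substring test for consecutive C characters, combined with and.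
import Mathlib
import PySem

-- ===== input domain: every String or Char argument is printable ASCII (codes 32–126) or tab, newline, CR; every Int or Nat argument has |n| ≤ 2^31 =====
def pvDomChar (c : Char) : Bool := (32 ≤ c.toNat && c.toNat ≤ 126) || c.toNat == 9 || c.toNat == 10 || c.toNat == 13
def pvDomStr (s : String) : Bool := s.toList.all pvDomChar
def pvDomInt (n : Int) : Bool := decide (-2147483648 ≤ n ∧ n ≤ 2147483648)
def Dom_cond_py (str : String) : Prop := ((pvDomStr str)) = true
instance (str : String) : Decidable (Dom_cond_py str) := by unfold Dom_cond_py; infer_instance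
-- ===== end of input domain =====

-- B replaces A's fused index loop (per-character branches, early return) by two independent
-- whole-string scans: str.count('B') >= 2 and 'CC' not in str.  Objective: idiomatic.

-- ===== PORT A =====
-- the 'for i in range(len(str))' loop with its early 'return False'
def condGo (s : List Char) : List Int → Int → Bool
  | [], bs => decide (2 ≤ bs)
  | i :: rest, bs =>
      let bs' := if PySem.List.pyGet? s i == some 'B' then bs + 1 else bs
      if PySem.List.pyGet? s i == some 'C' && decide (0 < i) &&
         (PySem.List.pyGet? s (i - 1) == some 'C') then false
      else condGo s rest bs'

def cond_py (str : String) : Bool :=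
  condGo str.toList (PySem.List.pyRange 0 (PySem.Str.len str)) 0

-- ===== PORT B =====
def cond_py_alt (str : String) : Bool :=
  decide (2 ≤ PySem.Str.count str "B") && !(PySem.Str.isIn "CC" str)

-- ===== PRECONDITION & SPEC =====
def Spec_cond_py (str : String) (out : Bool) : Prop := out = cond_py_alt str
instance (str : String) (out : Bool) : Decidable (Spec_cond_py str out) := by unfold Spec_cond_py; infer_instance

-- ===== CLAIM (what is proved, stated in full; the proofs are below) =====
def Claim_equal_cond_py : Prop := ∀ (str : String), Dom_cond_py str → Spec_cond_py str (cond_py str)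

-- ===== LEMMAS AND PROOFS =====

-- structural middle form of A's loop: previous character + remaining suffix
def condRec (prev : Option Char) (bs : Int) : List Char → Bool
  | [] => decide (2 ≤ bs)
  | c :: t =>
      let bs' := if c == 'B' then bs + 1 else bs
      if prev == some 'C' && c == 'C' then false else condRec (some c) bs' t

def hasCC : List Char → Bool
  | [] => false
  | [_] => false
  | a :: b :: t => (a == 'C' && b == 'C') || hasCC (b :: t)

lemma hasCC_cons (c : Char) (t : List Char) :
    hasCC (c :: t) = ((c == 'C' && (t.head? == some 'C')) || hasCC t) := by
  cases t <;> simp [hasCC]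

lemma hasCC_iff (l : List Char) : hasCC l = true ↔ ['C', 'C'] <:+: l := by
  fun_induction hasCC l with
  | case1 => simp [hasCC]
  | case2 a =>
      simp only [Bool.false_eq_true, false_iff]
      exact fun h => absurd h.length_le (by simp)
  | case3 a b t ih =>
      simp only [hasCC, Bool.or_eq_true, Bool.and_eq_true, beq_iff_eq, ih,
        List.infix_cons_iff (l₁ := ['C','C']) (a := a)]
      constructor
      · rintro (⟨rfl, rfl⟩ | h)
        · exact Or.inl (by simp)
        · exact Or.inr h
      · rintro (h | h)
        · rcases List.cons_prefix_cons.mp h with ⟨rfl, h2⟩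
          rcases List.cons_prefix_cons.mp h2 with ⟨rfl, _⟩
          exact Or.inl ⟨rfl, rfl⟩
        · exact Or.inr h

lemma condRec_eq (l : List Char) (prev : Option Char) (bs : Int) :
    condRec prev bs l =
      (if (prev == some 'C' && (l.head? == some 'C')) || hasCC l then false
       else decide (2 ≤ bs + (l.count 'B' : Int))) := by
  induction l generalizing prev bs with
  | nil => simp [condRec, hasCC]
  | cons c t ih =>
      simp only [condRec, ih, hasCC_cons, List.head?_cons]
      by_cases hpc : prev = some 'C' <;> by_cases hc : c = 'C' <;>
        by_cases hb : c = 'B' <;>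
        simp [hpc, hc, hb, List.count_cons, add_comm, add_assoc, add_left_comm] <;>
        split <;> simp_all <;> omega

-- A's index loop equals the structural middle form
lemma condGo_eq_condRec (s : List Char) (n : Nat) (k : Nat) (bs : Int)
    (hn : s.length - k ≤ n) :
    condGo s (PySem.List.pyRange (k : Int) (s.length : Int)) bs =
      condRec (if k = 0 then none else s[k - 1]?) bs (s.drop k) := by
  induction n generalizing k bs with
  | zero =>
      have hk : s.length ≤ k := by omega
      rw [PySem.List.pyRange_one_eq_nil (by exact_mod_cast hk),
        List.drop_eq_nil_of_le hk]
      rfl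
  | succ n ih =>
      by_cases hk : k < s.length
      · rw [PySem.List.pyRange_one_cons (by exact_mod_cast hk),
          List.drop_eq_getElem_cons hk]
        have hget : PySem.List.pyGet? s (k : Int) = some s[k] := by
          simp [PySem.List.pyGet?_natCast, List.getElem?_eq_getElem hk]
        have hprev : ((PySem.List.pyGet? s ((k : Int) - 1) == some 'C') && decide (0 < (k : Int)))
            = ((if k = 0 then none else s[k - 1]?) == some 'C') := by
          by_cases h0 : k = 0
          · simp [h0]
          · have hk1 : ((k : Int) - 1) = ((k - 1 : Nat) : Int) := by omega
            rw [hk1]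
            simp only [h0, if_false, PySem.List.pyGet?_natCast]
            simp [Nat.pos_of_ne_zero h0]
        simp only [condGo, condRec, hget]
        rw [show ((k : Int) + 1) = ((k + 1 : Nat) : Int) by omega,
          ih (k + 1) _ (by omega)]
        have hnext : (if k + 1 = 0 then none else s[k + 1 - 1]?) = some s[k] := by
          simp [List.getElem?_eq_getElem hk]
        rw [hnext, ← hprev]
        cases hA : (s[k] == 'C') <;> cases hP : decide (0 < (k : Int)) <;>
          cases hB : (PySem.List.pyGet? s ((k : Int) - 1) == some 'C') <;>
          simp [hA, hP, hB]
      · have hk' : s.length ≤ k := by omega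
        rw [PySem.List.pyRange_one_eq_nil (by exact_mod_cast hk'),
          List.drop_eq_nil_of_le hk']
        rfl

-- single-character Chars.count is List.count
lemma count_go_single (c : Char) (l : List Char) (fuel acc : Nat)
    (h : l.length ≤ fuel) :
    PySem.Chars.count.go [c] fuel l acc = acc + l.count c := by
  induction l generalizing fuel acc with
  | nil => cases fuel <;> simp [PySem.Chars.count.go]
  | cons a t ih =>
      cases fuel with
      | zero => simp at h
      | succ m =>
          rw [PySem.Chars.count.go]
          by_cases ha : a = c
          · simp [List.isPrefixOf, ha, ih _ _ (by simpa using h)]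
            omega
          · simp [List.isPrefixOf, ha, ih _ _ (by simpa using h)]
            exact fun hc => ha hc.symm

lemma chars_count_single (s : List Char) (c : Char) :
    PySem.Chars.count s [c] = s.count c := by
  simp [PySem.Chars.count, count_go_single c s s.length 0 le_rfl]

-- ===== VERDICT (by name: the statement is the Claim_ definition above) =====
theorem cond_py_spec : Claim_equal_cond_py := by
  intro str _
  unfold Spec_cond_py cond_py cond_py_alt
  have hlen : PySem.Str.len str = (str.toList.length : Int) := by
    simp [PySem.Str.len_eq, PySem.Chars.len_eq]
  rw [hlen]
  have hmain := condGo_eq_condRec str.toList str.toList.length 0 0 (by omega)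
  simp only [Nat.cast_zero] at hmain
  rw [hmain, condRec_eq]
  have hcnt : PySem.Str.count str "B" = str.toList.count 'B' := by
    rw [PySem.Str.count_eq]
    exact chars_count_single _ _
  have hin : PySem.Str.isIn "CC" str = hasCC str.toList := by
    rw [PySem.Str.isIn]
    rw [show ("CC".toList) = ['C','C'] by decide]
    cases h : hasCC str.toList
    · simp only [PySem.Chars.isIn_eq_false_iff]
      rw [← hasCC_iff, h]
      simp
    · simp [PySem.Chars.isIn_iff_infix, ← hasCC_iff, h]
  simp only [List.drop_zero, hcnt, hin]
  cases h : hasCC str.toList <;> simp [h]
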